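-- pv_equiv track=rewrite | github.com/zachartrand/Python-Interview-Prep | Code Challenges/comparative_weights.py | scale_of_truth_n
-- ===== SOURCE A (Python) =====
-- def scale_of_truth_n(n):
--     """
--     Return the minimum number of times you would need to weigh 'n'
--     basketballs to find the one that is heavier than the others.
--     """
--     count = 0
--     while n > 1:
--         while n % 3 != 0:
--             n += 1
--
--         n //= 3
--         count += 1
--
--     return count
-- ===== SOURCE B (Python) =====
-- def scale_of_truth_n(n):
--     # Grow a power of three up to n: smallest count with 3**count >= n.
--     count = 0
--     p = 1
--     while p < n:
--         p *= 3
--         count += 1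
--     return count
-- ===== Notes on version B (the rewrite author's own statement) =====
-- stated objective: simpler
-- what changed: Instead of repeatedly rounding n up to a multiple of 3 and floor-dividing (a nested while loop shrinking n), B multiplies a running power of three up from 1 until it reaches n, returning the smallest k with 3**k >= n.
import Mathlib
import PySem

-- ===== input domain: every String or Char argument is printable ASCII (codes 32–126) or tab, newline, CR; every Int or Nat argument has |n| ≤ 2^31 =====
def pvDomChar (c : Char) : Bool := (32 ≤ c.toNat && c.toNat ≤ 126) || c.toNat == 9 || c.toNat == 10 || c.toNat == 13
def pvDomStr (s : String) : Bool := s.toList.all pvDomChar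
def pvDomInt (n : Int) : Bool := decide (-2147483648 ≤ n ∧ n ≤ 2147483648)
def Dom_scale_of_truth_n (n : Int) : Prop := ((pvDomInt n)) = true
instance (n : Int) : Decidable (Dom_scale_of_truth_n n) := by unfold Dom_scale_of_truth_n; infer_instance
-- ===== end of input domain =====

-- B: instead of A's shrink-n loop (round n up to a multiple of 3, then floor-divide by 3),
-- grow a power of three from 1 up to n and count the multiplications (simpler single loop).


-- ===== PORT A =====
-- inner loop 'while n % 3 != 0: n += 1'; fuel 2 suffices (at most two increments)
def pvRoundUp3 (fuel : Nat) (n : Int) : Int :=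
  match fuel with
  | 0 => n
  | f + 1 => if PySem.Int.mod n 3 ≠ 0 then pvRoundUp3 f (n + 1) else n

-- outer loop 'while n > 1: (inner); n //= 3; count += 1'; fuel n.toNat bounds the iterations
def pvLoopA (fuel : Nat) (n count : Int) : Int :=
  match fuel with
  | 0 => count
  | f + 1 =>
    if n > 1 then pvLoopA f (PySem.Int.floordiv (pvRoundUp3 2 n) 3) (count + 1) else count

def scale_of_truth_n (n : Int) : Int := pvLoopA n.toNat n 0

-- ===== PORT B =====
-- 'while p < n: p *= 3; count += 1'; fuel n.toNat bounds the iterations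
def pvLoopB (fuel : Nat) (n p count : Int) : Int :=
  match fuel with
  | 0 => count
  | f + 1 => if p < n then pvLoopB f n (p * 3) (count + 1) else count

def scale_of_truth_n_alt (n : Int) : Int := pvLoopB n.toNat n 1 0

-- ===== PRECONDITION & SPEC =====
def Spec_scale_of_truth_n (n : Int) (out : Int) : Prop := out = scale_of_truth_n_alt n
instance (n : Int) (out : Int) : Decidable (Spec_scale_of_truth_n n out) := by unfold Spec_scale_of_truth_n; infer_instance

-- ===== CLAIM (what is proved, stated in full; the proofs are below) =====
def Claim_equal_scale_of_truth_n : Prop := ∀ (n : Int), Dom_scale_of_truth_n n → Spec_scale_of_truth_n n (scale_of_truth_n n)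

-- ===== LEMMAS AND PROOFS =====

theorem pvRoundUp3_eq (n : Int) : pvRoundUp3 2 n = n + (3 - n % 3) % 3 := by
  have h : n % 3 = 0 ∨ n % 3 = 1 ∨ n % 3 = 2 := by omega
  rcases h with h | h | h
  · simp [pvRoundUp3, h]
  · have h1 : (n + 1) % 3 = 2 := by omega
    simp [pvRoundUp3, h, h1]; omega
  · have h1 : (n + 1) % 3 = 0 := by omega
    simp [pvRoundUp3, h, h1]

theorem pvStep_bounds (n : Int) :
    n ≤ 3 * PySem.Int.floordiv (pvRoundUp3 2 n) 3 ∧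
      3 * PySem.Int.floordiv (pvRoundUp3 2 n) 3 ≤ n + 2 := by
  rw [PySem.Int.floordiv_eq_ediv_of_pos (by norm_num : (0:Int) < 3), pvRoundUp3_eq]
  omega

theorem pvLoopA_stop (f : Nat) (n c : Int) (h : ¬ n > 1) : pvLoopA f n c = c := by
  cases f <;> simp [pvLoopA, h]

theorem pvLoopB_stop (f : Nat) (n p c : Int) (h : ¬ p < n) : pvLoopB f n p c = c := by
  cases f <;> simp [pvLoopB, h]

theorem pvLoopA_acc (f : Nat) (n c : Int) : pvLoopA f n c = pvLoopA f n 0 + c := by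
  induction f generalizing n c with
  | zero => simp [pvLoopA]
  | succ f ih =>
      by_cases h : n > 1
      · simp only [pvLoopA, if_pos h]
        rw [ih _ (c + 1), ih _ (0 + 1)]; ring
      · simp only [pvLoopA, if_neg h]; ring

theorem pvLoopB_acc (f : Nat) (n p c : Int) : pvLoopB f n p c = pvLoopB f n p 0 + c := by
  induction f generalizing p c with
  | zero => simp [pvLoopB]
  | succ f ih =>
      by_cases h : p < n
      · simp only [pvLoopB, if_pos h]
        rw [ih _ (c + 1), ih _ (0 + 1)]; ring
      · simp only [pvLoopB, if_neg h]; ring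

theorem pvLoopA_ad (N : Nat) : ∀ (f g : Nat) (n c : Int), n.toNat ≤ N →
    n.toNat ≤ f → n.toNat ≤ g → pvLoopA f n c = pvLoopA g n c := by
  induction N with
  | zero =>
      intro f g n c hN hf hg
      rw [pvLoopA_stop f n c (by omega), pvLoopA_stop g n c (by omega)]
  | succ N ih =>
      intro f g n c hN hf hg
      by_cases h : n > 1
      · have hs := pvStep_bounds n
        obtain ⟨f', rfl⟩ : ∃ f', f = f' + 1 := ⟨f - 1, by omega⟩
        obtain ⟨g', rfl⟩ : ∃ g', g = g' + 1 := ⟨g - 1, by omega⟩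
        simp only [pvLoopA, if_pos h]
        exact ih f' g' _ (c + 1) (by omega) (by omega) (by omega)
      · rw [pvLoopA_stop _ n c h, pvLoopA_stop _ n c h]

theorem pvLoopB_ad (N : Nat) : ∀ (f g : Nat) (n p c : Int), 0 < p → (n - p).toNat ≤ N →
    (n - p).toNat ≤ f → (n - p).toNat ≤ g → pvLoopB f n p c = pvLoopB g n p c := by
  induction N with
  | zero =>
      intro f g n p c hp hN hf hg
      rw [pvLoopB_stop f n p c (by omega), pvLoopB_stop g n p c (by omega)]
  | succ N ih =>
      intro f g n p c hp hN hf hg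
      by_cases h : p < n
      · obtain ⟨f', rfl⟩ : ∃ f', f = f' + 1 := ⟨f - 1, by omega⟩
        obtain ⟨g', rfl⟩ : ∃ g', g = g' + 1 := ⟨g - 1, by omega⟩
        simp only [pvLoopB, if_pos h]
        exact ih f' g' n (p * 3) (c + 1) (by omega) (by omega) (by omega) (by omega)
      · rw [pvLoopB_stop _ n p c h, pvLoopB_stop _ n p c h]

theorem pvLoopB_shift (f : Nat) : ∀ (n p c : Int), 1 < n → 0 < p →
    pvLoopB f n (p * 3) c = pvLoopB f (PySem.Int.floordiv (pvRoundUp3 2 n) 3) p c := by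
  induction f with
  | zero => intro n p c hn hp; rfl
  | succ f ih =>
      intro n p c hn hp
      have hs := pvStep_bounds n
      set m := PySem.Int.floordiv (pvRoundUp3 2 n) 3 with hm
      have hiff : p * 3 < n ↔ p < m := by omega
      by_cases h : p < m
      · simp only [pvLoopB, if_pos (hiff.mpr h), if_pos h]
        exact ih n (p * 3) (c + 1) hn (by omega)
      · simp only [pvLoopB, if_neg (fun hc => h (hiff.mp hc)), if_neg h]

theorem pvMain (N : Nat) : ∀ n : Int, n.toNat ≤ N →
    pvLoopA n.toNat n 0 = pvLoopB n.toNat n 1 0 := by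
  induction N with
  | zero =>
      intro n hn
      rw [pvLoopA_stop _ n 0 (by omega), pvLoopB_stop _ n 1 0 (by omega)]
  | succ N ih =>
      intro n hn
      by_cases h : 1 < n
      · have hs := pvStep_bounds n
        set m := PySem.Int.floordiv (pvRoundUp3 2 n) 3 with hm
        obtain ⟨t, ht⟩ : ∃ t, n.toNat = t + 1 := ⟨n.toNat - 1, by omega⟩
        rw [ht]
        simp only [pvLoopA, pvLoopB, if_pos h]
        rw [← hm, pvLoopA_acc t m (0 + 1),
          pvLoopA_ad m.toNat t m.toNat m 0 (by omega) (by omega) (by omega)]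
        rw [pvLoopB_acc t n (1 * 3) (0 + 1), pvLoopB_shift t n 1 0 h (by norm_num)]
        rw [← hm, pvLoopB_ad m.toNat t m.toNat m 1 0 (by norm_num) (by omega) (by omega) (by omega)]
        rw [ih m (by omega)]
      · rw [pvLoopA_stop _ n 0 h, pvLoopB_stop _ n 1 0 (by omega)]

-- ===== VERDICT (by name: the statement is the Claim_ definition above) =====
theorem scale_of_truth_n_spec : Claim_equal_scale_of_truth_n := by
  intro n _
  unfold Spec_scale_of_truth_n scale_of_truth_n scale_of_truth_n_alt
  exact pvMain n.toNat n le_rfl
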